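-- pv_equiv track=rewrite | github.com/SeerLabs/semeval2017 | crfsemeval/CreateOneTagandPOSCHunks.py | changeBeginTags
-- ===== SOURCE A (Python) =====
-- def filterUnderscores(tokens):
--      return [x for x in tokens if "-" not in x[0]]
--
-- def changeBeginTags(tokens,p): #expects a list of tokens of the form (word,tags**), for example, (word, POS-TAG, Chunk-Tag, Label)
--     # and a position, 1,2 etc.. The position determine which labels to change.
--     tags = set([x[p] for x in tokens])
--     if len(tags) == 1 and list(tags)[0] == "O": #just one tag, O
--         return tokens
--     else:
--         '''
--         A token sequence
--         [('An', 'DT', u'B-NP', 'O'), ('Experiment', 'NN', u'I-NP', 'O'), ('In', 'IN', u'B-PP', 'O'), ('Semantic', 'NNP', u'B-NP', 'B_D'), ('Tagging', 'NNP', u'I-NP', 'I_D'), ('Using', 'NNP', u'I-NP', 'O'), ('Hidden', 'NNP', u'I-NP', 'B_T'), ('Markov', 'NNP', u'I-NP', 'I_T'), ('Model', 'NNP', u'I-NP', 'I_T'), ('Tagging', 'VBG', u'B-VP', 'B_D')]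
--         should be changed to:
--         [('An', 'DT', u'I-NP', 'O'), ('Experiment', 'NN', u'I-NP', 'O'), ('In', 'IN', u'B-PP', 'O'), ('Semantic', 'NNP', u'I-NP', 'I_D'), ('Tagging', 'NNP', u'I-NP', 'I_D'), ('Using', 'NNP', u'I-NP', 'O'), ('Hidden', 'NNP', u'I-NP', 'I_T'), ('Markov', 'NNP', u'I-NP', 'I_T'), ('Model', 'NNP', u'I-NP', 'I_T'), ('Tagging', 'VBG', u'I-VP', 'I_D')]
--         following the CoNLL guideline: http://www.cnts.ua.ac.be/conll2003/ner/
--         Only if two phrases of the same type immediately follow each other, the first word of the second phrase will have tag B-TYPE to show that it starts a new phrase. A word with tag O is not part of a phrase.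
--         '''
--         bindices = [x for (x,y) in enumerate(tokens) if y[p].startswith("B")]
--         ntokens = [list(x) for x in tokens]
--         for bindex in bindices:
--             if bindex != 0:
--                 leftTokenLabel = tokens[bindex-1][p]
--                 thisTokenLabel = tokens[bindex][p]
--                 if leftTokenLabel == "O" or leftTokenLabel.split("-")[1] != thisTokenLabel.split("-")[1]:
--                     ntokens[bindex][p] = thisTokenLabel.replace("B-","I-")
--             else:
--                 ntokens[0][p] = ntokens[0][p].replace("B-","I-")
--         return filterUnderscores([tuple(x) for x in ntokens])
-- ===== SOURCE B (Python) =====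
-- def changeBeginTags(tokens, p):
--     if {x[p] for x in tokens} == {"O"}:
--         return tokens
--     out = []
--     prev = None
--     for tok in tokens:
--         tag = tok[p]
--         if tag.startswith("B") and (prev is None or prev == "O"
--                                     or prev.split("-")[1] != tag.split("-")[1]):
--             ntok = list(tok)
--             ntok[p] = tag.replace("B-", "I-")
--             tok = tuple(ntok)
--         if "-" not in tok[0]:
--             out.append(tok)
--         prev = tag
--     return out
-- ===== Notes on version B (the rewrite author's own statement) =====
-- stated objective: simpler
-- what changed: A collects the list of B-tag indices, deep-copies the token list, mutates it by random-access index (looking up the left neighbour by index) and then filters in a separate pass; B is one streaming pass over the tokens that tracks the previous original tag, rewrites the current token directly and fuses the hyphen-word filter into the same loop, building neither index list nor copy.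
import Mathlib
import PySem

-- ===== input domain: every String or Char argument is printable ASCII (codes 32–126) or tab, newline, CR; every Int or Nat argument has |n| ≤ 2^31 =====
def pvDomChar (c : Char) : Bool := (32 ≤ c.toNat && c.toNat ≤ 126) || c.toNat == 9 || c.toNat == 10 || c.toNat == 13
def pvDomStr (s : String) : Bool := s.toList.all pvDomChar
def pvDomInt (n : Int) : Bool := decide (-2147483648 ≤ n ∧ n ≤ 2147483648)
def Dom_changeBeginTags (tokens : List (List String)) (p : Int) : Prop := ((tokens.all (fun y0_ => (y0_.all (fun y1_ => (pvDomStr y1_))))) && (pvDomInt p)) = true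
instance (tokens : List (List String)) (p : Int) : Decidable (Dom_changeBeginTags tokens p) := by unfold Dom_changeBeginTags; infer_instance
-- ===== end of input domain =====

-- B replaces A's index-list collection, row copy, index-based in-place mutation and separate
-- filter pass by one fused streaming pass tracking the previous tag (objective: simpler).

-- shared primitive helpers: x[p] read as a tag string, and s.split("-")[1]
def pvTag (row : List String) (p : Int) : String := PySem.List.pyGetD row p ""
def pvSplit1 (s : String) : String :=
  PySem.List.pyGetD ((PySem.Str.split? s "-").getD []) 1 ""

-- ===== PORT A =====
def filterUnderscores (tokens : List (List String)) : List (List String) :=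
  tokens.filter (fun x => !(PySem.Str.isIn "-" (PySem.List.pyGetD x 0 "")))

-- the body of A's 'for bindex in bindices' loop, named so the lemmas can speak about it
def pvStepA (tokens : List (List String)) (p : Int)
    (nt : List (List String)) (bindex : Int) : List (List String) :=
  if bindex ≠ 0 then
    let leftTokenLabel := pvTag (PySem.List.pyGetD tokens (bindex - 1) []) p
    let thisTokenLabel := pvTag (PySem.List.pyGetD tokens bindex []) p
    if leftTokenLabel == "O" || (pvSplit1 leftTokenLabel != pvSplit1 thisTokenLabel) then
      PySem.List.pySetD nt bindex
        (PySem.List.pySetD (PySem.List.pyGetD nt bindex []) p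
          (PySem.Str.replace thisTokenLabel "B-" "I-"))
    else nt
  else
    let row0 := PySem.List.pyGetD nt 0 []
    PySem.List.pySetD nt 0
      (PySem.List.pySetD row0 p (PySem.Str.replace (pvTag row0 p) "B-" "I-"))

def changeBeginTags (tokens : List (List String)) (p : Int) : List (List String) :=
  let tags : PySem.Set String := PySem.Set.ofList (tokens.map (fun x => pvTag x p))
  if tags.length == 1 && (PySem.List.pyGetD tags 0 "" == "O") then tokens
  else
    let bindices := ((PySem.List.enumerate tokens 0).filter
        (fun e => PySem.Str.startswith (pvTag e.2 p) "B")).map (fun e => e.1)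
    let ntokens := tokens
    let ntokens := bindices.foldl (pvStepA tokens p) ntokens
    filterUnderscores ntokens

-- ===== PORT B =====
def changeBeginTags_alt (tokens : List (List String)) (p : Int) : List (List String) :=
  if PySem.Set.equal (PySem.Set.ofList (tokens.map (fun x => pvTag x p)))
      (PySem.Set.ofList ["O"]) then tokens
  else
    (tokens.foldl (fun (s : List (List String) × Option String) tok =>
        let tag := pvTag tok p
        let tok' := if PySem.Str.startswith tag "B" &&
            (s.2 == none || s.2 == some "O" ||
              (pvSplit1 ((s.2).getD "") != pvSplit1 tag)) then
            PySem.List.pySetD tok p (PySem.Str.replace tag "B-" "I-")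
          else tok
        (if !(PySem.Str.isIn "-" (PySem.List.pyGetD tok' 0 "")) then s.1 ++ [tok'] else s.1,
         some tag))
      ([], none)).1

-- ===== PRECONDITION & SPEC =====
-- Pre_ is exactly where Python A returns: p must be a valid index into every token, and no
-- split("-")[1] may hit a dashless tag (a B-starting tag compared with its non-"O" left
-- neighbour needs "-" in both); outside this A raises IndexError.
def Pre_changeBeginTags (tokens : List (List String)) (p : Int) : Prop :=
  (∀ row ∈ tokens, PySem.Raise.InRange row.length p) ∧
  (∀ pr ∈ tokens.zip tokens.tail,
     PySem.Str.startswith (pvTag pr.2 p) "B" = true →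
     pvTag pr.1 p ≠ "O" →
     PySem.Str.isIn "-" (pvTag pr.1 p) = true ∧ PySem.Str.isIn "-" (pvTag pr.2 p) = true)
instance (tokens : List (List String)) (p : Int) : Decidable (Pre_changeBeginTags tokens p) := by
  unfold Pre_changeBeginTags; infer_instance

def pvWitness_changeBeginTags : List (List String) × Int :=
  ([["An", "B-NP"], ["Experiment", "I-NP"], ["In", "B-PP"]], 1)

def Spec_changeBeginTags (tokens : List (List String)) (p : Int) (out : List (List String)) : Prop := out = changeBeginTags_alt tokens p
instance (tokens : List (List String)) (p : Int) (out : List (List String)) : Decidable (Spec_changeBeginTags tokens p out) := by unfold Spec_changeBeginTags; infer_instance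

-- ===== CLAIM (what is proved, stated in full; the proofs are below) =====
def Claim_equal_changeBeginTags : Prop := ∀ (tokens : List (List String)) (p : Int), Dom_changeBeginTags tokens p → Pre_changeBeginTags tokens p → Spec_changeBeginTags tokens p (changeBeginTags tokens p)

-- ===== LEMMAS AND PROOFS =====

-- the common per-token rewrite and its firing condition
def pvRew (tag : String) : String := PySem.Str.replace tag "B-" "I-"

def pvCond (prev : Option String) (tag : String) : Bool :=
  PySem.Str.startswith tag "B" &&
    (prev == none || prev == some "O" || (pvSplit1 (prev.getD "") != pvSplit1 tag))

-- canonical form of the mutation pass: rewrite each token from the previous original tag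
def pvChain (p : Int) (prev : Option String) : List (List String) → List (List String)
  | [] => []
  | tok :: rest =>
    (if pvCond prev (pvTag tok p) then PySem.List.pySetD tok p (pvRew (pvTag tok p)) else tok)
      :: pvChain p (some (pvTag tok p)) rest

-- the tag preceding position j in pvChain
def pvPrevAt (p : Int) (prev : Option String) (ts : List (List String)) : Nat → Option String
  | 0 => prev
  | k + 1 => some (pvTag (ts[k]?.getD []) p)

-- what A's loop leaves at a B-index j
def pvTargetA (tokens : List (List String)) (p : Int) (j : Nat) : List String :=
  let row := tokens[j]?.getD []
  let tag := pvTag row p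
  if j = 0 then PySem.List.pySetD row p (pvRew tag)
  else
    let left := pvTag (tokens[j-1]?.getD []) p
    if left == "O" || (pvSplit1 left != pvSplit1 tag) then PySem.List.pySetD row p (pvRew tag)
    else row

lemma pvChain_getElem? (p : Int) (prev : Option String) (ts : List (List String)) (j : Nat) :
    (pvChain p prev ts)[j]? = (ts[j]?).map (fun tok =>
      if pvCond (pvPrevAt p prev ts j) (pvTag tok p) then
        PySem.List.pySetD tok p (pvRew (pvTag tok p)) else tok) := by
  induction ts generalizing prev j with
  | nil => simp [pvChain]
  | cons tok rest ih =>
    cases j with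
    | zero => simp [pvChain, pvPrevAt]
    | succ k =>
      simp only [pvChain, List.getElem?_cons_succ, ih]
      cases k with
      | zero => rfl
      | succ m => rfl

lemma pv_mem_bindices (tokens : List (List String)) (p : Int) (i : Int) :
    i ∈ (((PySem.List.enumerate tokens 0).filter
        (fun e => PySem.Str.startswith (pvTag e.2 p) "B")).map (fun e => e.1)) ↔
      ∃ k : Nat, ∃ _ : k < tokens.length, i = (k : Int) ∧
        PySem.Str.startswith (pvTag tokens[k] p) "B" = true := by
  simp only [List.mem_map, List.mem_filter, PySem.List.mem_enumerate_iff]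
  constructor
  · rintro ⟨e, ⟨⟨k, hk, rfl⟩, hq⟩, rfl⟩
    exact ⟨k, hk, by simp, by simpa using hq⟩
  · rintro ⟨k, hk, rfl, hq⟩
    exact ⟨((k : Int), tokens[k]), ⟨⟨k, hk, by simp⟩, by simpa using hq⟩, rfl⟩

lemma pv_bindices_sorted (tokens : List (List String)) (p : Int) :
    (((PySem.List.enumerate tokens 0).filter
        (fun e => PySem.Str.startswith (pvTag e.2 p) "B")).map (fun e => e.1)).Pairwise (· < ·) := by
  apply List.Pairwise.map
  · exact fun a b h => h
  · exact List.Pairwise.sublist List.filter_sublist (PySem.List.pairwise_lt_enumerate tokens 0)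

lemma pvFoldA_getElem? (tokens : List (List String)) (p : Int) :
    ∀ (is : List Int) (nt : List (List String)),
      is.Pairwise (· < ·) →
      (∀ i ∈ is, ∃ k : Nat, i = (k : Int) ∧ k < tokens.length) →
      (∀ k : Nat, (k : Int) ∈ is → nt[k]? = tokens[k]?) →
      ∀ j : Nat, (is.foldl (pvStepA tokens p) nt)[j]? =
        if (j : Int) ∈ is then some (pvTargetA tokens p j) else nt[j]? := by
  intro is
  induction is with
  | nil => intro nt _ _ _ j; simp
  | cons i rest ih =>
    intro nt hpw hex hnt j
    obtain ⟨k, rfl, hk⟩ := hex i (List.mem_cons_self)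
    rw [List.pairwise_cons] at hpw
    have h0 : nt[k]? = tokens[k]? := hnt k (List.mem_cons_self)
    have hklen : k < nt.length := by
      have := h0.trans (List.getElem?_eq_getElem hk)
      exact (List.getElem?_eq_some_iff.mp this).1
    have hntk : nt[k] = tokens[k] := by
      have h1 := (List.getElem?_eq_getElem hklen).symm.trans (h0.trans (List.getElem?_eq_getElem hk))
      exact Option.some.inj h1
    have hgetk : PySem.List.pyGetD nt (k : Int) [] = tokens[k] := by
      simp [List.getD_eq_getElem?_getD, h0, List.getElem?_eq_getElem hk]
    have hrow : tokens[k]?.getD [] = tokens[k] := by simp [List.getElem?_eq_getElem hk]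
    have hstep_ne : ∀ m : Nat, m ≠ k → (pvStepA tokens p nt (k : Int))[m]? = nt[m]? := by
      intro m hm
      have hkm : k ≠ m := Ne.symm hm
      unfold pvStepA
      dsimp only
      by_cases h1 : ((k : Int) ≠ 0)
      · rw [if_pos h1]
        split_ifs with h2
        · simp [hkm]
        · rfl
      · rw [if_neg h1]
        have hk0 : k = 0 := by omega
        subst hk0
        simp [PySem.List.pySetD_of_nonneg, hkm]
    have hstep_k : (pvStepA tokens p nt (k : Int))[k]? = some (pvTargetA tokens p k) := by
      unfold pvStepA pvTargetA
      dsimp only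
      by_cases hk0 : k = 0
      · subst hk0
        simp only [Nat.cast_zero, ne_eq, not_true_eq_false, if_false]
        simp [PySem.List.pyGetD_zero, List.getD_eq_getElem?_getD, hntk,
          List.getElem?_eq_getElem hk, PySem.List.pySetD_of_nonneg, hklen, pvRew]
      · have hne : ((k : Int) ≠ 0) := by exact_mod_cast hk0
        have hcast : (k : Int) - 1 = ((k - 1 : Nat) : Int) := by omega
        rw [if_pos hne]
        simp only [hcast, PySem.List.pyGetD_natCast, hgetk, List.getD_eq_getElem?_getD]
        rw [if_neg hk0]
        rw [hrow]
        split_ifs with hc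
        · simp [hklen, pvRew]
        · rw [h0, List.getElem?_eq_getElem hk]
    rw [List.foldl_cons]
    rw [ih (pvStepA tokens p nt (k : Int)) hpw.2 (fun i hi => hex i (List.mem_cons_of_mem _ hi))
      (fun m hm => by
        have hmk : m ≠ k := by
          have := hpw.1 _ hm
          omega
        rw [hstep_ne m hmk, hnt m (List.mem_cons_of_mem _ hm)])]
    by_cases hj : (j : Int) ∈ rest
    · simp [hj]
    · by_cases hjk : j = k
      · subst hjk
        simp [hj, hstep_k]
      · have hne2 : ((j : Int)) ≠ (k : Int) := by exact_mod_cast hjk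
        simp [hj, hne2, hstep_ne j hjk]

lemma pv_else_eq (tokens : List (List String)) (p : Int) :
    ((((PySem.List.enumerate tokens 0).filter
        (fun e => PySem.Str.startswith (pvTag e.2 p) "B")).map (fun e => e.1)).foldl
      (pvStepA tokens p) tokens) = pvChain p none tokens := by
  apply List.ext_getElem?
  intro j
  rw [pvFoldA_getElem? tokens p _ tokens (pv_bindices_sorted tokens p)
    (fun i hi => by
      obtain ⟨k, hk, rfl, _⟩ := (pv_mem_bindices tokens p i).mp hi
      exact ⟨k, rfl, hk⟩)
    (fun k _ => rfl) j]
  rw [pvChain_getElem?]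
  by_cases hj : j < tokens.length
  · have hrowj : tokens[j]?.getD [] = tokens[j] := by simp [List.getElem?_eq_getElem hj]
    by_cases hq : PySem.Str.startswith (pvTag tokens[j] p) "B" = true
    · rw [if_pos ((pv_mem_bindices tokens p j).mpr ⟨j, hj, rfl, hq⟩)]
      rw [List.getElem?_eq_getElem hj, Option.map_some]
      unfold pvTargetA pvCond pvPrevAt
      have hq2 : PySem.Chars.startswith (pvTag tokens[j] p).toList ['B'] = true := by
        simpa using hq
      cases j with
      | zero => simp [hrowj, hq2]
      | succ m =>
        have hrowm : tokens[m]?.getD [] = tokens[m] := by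
          simp [List.getElem?_eq_getElem (by omega : m < tokens.length)]
        simp only [hrowj, Nat.succ_sub_one, if_neg (Nat.succ_ne_zero m)]
        simp [hq2, hrowm, pvRew]
    · rw [if_neg (by
        intro hmem
        obtain ⟨k, hk, hkk, hq'⟩ := (pv_mem_bindices tokens p ((j : Int))).mp hmem
        have : j = k := by exact_mod_cast hkk
        subst this
        exact hq hq')]
      rw [List.getElem?_eq_getElem hj, Option.map_some]
      have hq2 : PySem.Chars.startswith (pvTag tokens[j] p).toList ['B'] = false := by
        simpa using hq
      have : pvCond (pvPrevAt p none tokens j) (pvTag tokens[j] p) = false := by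
        unfold pvCond
        simp [hq2]
      simp [this]
  · have hno : ¬ ((j : Int) ∈ (((PySem.List.enumerate tokens 0).filter
        (fun e => PySem.Str.startswith (pvTag e.2 p) "B")).map (fun e => e.1))) := by
      intro hmem
      obtain ⟨k, hk, hkk, _⟩ := (pv_mem_bindices tokens p ((j : Int))).mp hmem
      have : j = k := by exact_mod_cast hkk
      omega
    rw [if_neg hno]
    have h1 : tokens[j]? = none := List.getElem?_eq_none_iff.mpr (by omega)
    simp [h1]

lemma pvChain_cons (p : Int) (prev : Option String) (tok : List String)
    (rest : List (List String)) :
    pvChain p prev (tok :: rest) =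
      (if pvCond prev (pvTag tok p) then PySem.List.pySetD tok p (pvRew (pvTag tok p)) else tok)
        :: pvChain p (some (pvTag tok p)) rest := rfl

lemma pvB_fold (p : Int) :
    ∀ (ts : List (List String)) (prev : Option String) (acc : List (List String)),
      (ts.foldl (fun (s : List (List String) × Option String) tok =>
        let tag := pvTag tok p
        let tok' := if PySem.Str.startswith tag "B" &&
            (s.2 == none || s.2 == some "O" ||
              (pvSplit1 ((s.2).getD "") != pvSplit1 tag)) then
            PySem.List.pySetD tok p (PySem.Str.replace tag "B-" "I-")
          else tok
        (if !(PySem.Str.isIn "-" (PySem.List.pyGetD tok' 0 "")) then s.1 ++ [tok'] else s.1,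
         some tag))
        (acc, prev)).1 = acc ++ (pvChain p prev ts).filter
          (fun x => !(PySem.Str.isIn "-" (PySem.List.pyGetD x 0 ""))) := by
  intro ts
  induction ts with
  | nil => intro prev acc; simp [pvChain]
  | cons tok rest ih =>
    intro prev acc
    rw [List.foldl_cons]
    rw [ih]
    show (if !(PySem.Str.isIn "-" (PySem.List.pyGetD
        (if pvCond prev (pvTag tok p) then PySem.List.pySetD tok p (pvRew (pvTag tok p)) else tok)
        0 "")) then acc ++ [(if pvCond prev (pvTag tok p) then
          PySem.List.pySetD tok p (pvRew (pvTag tok p)) else tok)] else acc) ++ _ = _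
    rw [pvChain_cons, List.filter_cons]
    by_cases h1 : pvCond prev (pvTag tok p) = true <;>
      simp [h1] <;> split_ifs <;> simp

lemma pv_guard_eq (s : List String) (h : s.Nodup) :
    (s.length == 1 && (PySem.List.pyGetD s 0 "" == "O")) =
      PySem.Set.equal s (PySem.Set.ofList ["O"]) := by
  match s, h with
  | [], _ => decide
  | [a], _ =>
    have : PySem.Set.equal [a] (PySem.Set.ofList ["O"]) = (a == "O") := by
      by_cases ha : a = "O"
      · subst ha; decide
      · have : PySem.Set.equal [a] (PySem.Set.ofList ["O"]) = false := by
          by_contra hne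
          have := (PySem.Set.equal_iff [a] (PySem.Set.ofList ["O"])).mp
            (by revert hne; cases PySem.Set.equal [a] (PySem.Set.ofList ["O"]) <;> simp)
          have := (this a).mp (by simp)
          simp [PySem.Set.ofList] at this
          exact ha this
        simp [this, ha]
    rw [this]
    simp [PySem.List.pyGetD_zero_cons]
  | a :: b :: t, h =>
    have hne : PySem.Set.equal (a :: b :: t) (PySem.Set.ofList ["O"]) = false := by
      by_contra hcon
      have heq := (PySem.Set.equal_iff (a :: b :: t) (PySem.Set.ofList ["O"])).mp
        (by revert hcon; cases PySem.Set.equal (a :: b :: t) (PySem.Set.ofList ["O"]) <;> simp)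
      have ha := (heq a).mp (by simp)
      have hb := (heq b).mp (by simp)
      simp [PySem.Set.ofList] at ha hb
      rw [List.nodup_cons] at h
      exact h.1 (by simp [ha, hb.symm])
    rw [hne]
    simp

-- ===== VERDICT (by name: the statement is the Claim_ definition above) =====
theorem changeBeginTags_spec : Claim_equal_changeBeginTags := by
  intro tokens p _ _
  unfold Spec_changeBeginTags changeBeginTags changeBeginTags_alt
  dsimp only
  rw [← pv_guard_eq _ (PySem.Set.nodup_ofList _)]
  split_ifs with hguard
  · rfl
  · rw [pvB_fold p tokens none [], pv_else_eq tokens p]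
    unfold filterUnderscores
    simp
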